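-- pv_equiv track=rewrite | github.com/Hayeon-Lee/PS | 프로그래머스/unrated/120815. 피자 나눠 먹기 （2）/피자 나눠 먹기 （2）.py | solution
-- ===== SOURCE A (Python) =====
-- def solution(n):
--
--     i = 1
--     answer = 0
--
--     while(True):
--         if (n*i) % 6 == 0:
--             answer = ((n*i)//6)
--             break
--         i+=1
--
--     return answer
-- ===== SOURCE B (Python) =====
-- import math
--
-- def solution(n):
--     return n // math.gcd(n, 6)
-- ===== Notes on version B (the rewrite author's own statement) =====
-- stated objective: simpler
-- what changed: Replaced the incremental while-loop search for the first multiplier i with 6 | n*i by the closed form n // gcd(n, 6).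
import Mathlib
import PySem

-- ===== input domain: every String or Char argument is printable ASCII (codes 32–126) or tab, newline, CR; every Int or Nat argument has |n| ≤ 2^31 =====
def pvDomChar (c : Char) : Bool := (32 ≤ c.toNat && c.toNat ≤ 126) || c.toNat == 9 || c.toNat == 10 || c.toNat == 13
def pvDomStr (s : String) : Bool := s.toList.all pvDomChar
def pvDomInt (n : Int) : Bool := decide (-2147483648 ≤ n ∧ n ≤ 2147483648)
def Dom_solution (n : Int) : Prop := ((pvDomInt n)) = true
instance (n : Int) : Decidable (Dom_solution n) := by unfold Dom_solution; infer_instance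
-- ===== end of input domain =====

-- B replaces A's incremental search (smallest i with 6 | n*i) by the closed form n // gcd(n, 6); objective: simpler.

-- ===== PORT A =====
-- A's `while True` loop, searching i = 1, 2, …; it always stops by i = 6
-- (6 ∣ n*6), so fuel 6 starting at i = 1 exactly reproduces the loop.
def solutionLoop (n : Int) (i : Int) : Nat → Int
  | 0 => 0
  | fuel + 1 =>
    if PySem.Int.mod (n * i) 6 = 0 then PySem.Int.floordiv (n * i) 6
    else solutionLoop n (i + 1) fuel

def solution (n : Int) : Int := solutionLoop n 1 6

-- ===== PORT B =====
def solution_alt (n : Int) : Int := PySem.Int.floordiv n (Int.gcd n 6)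

-- ===== PRECONDITION & SPEC =====
def Spec_solution (n : Int) (out : Int) : Prop := out = solution_alt n
instance (n : Int) (out : Int) : Decidable (Spec_solution n out) := by unfold Spec_solution; infer_instance

-- ===== CLAIM (what is proved, stated in full; the proofs are below) =====
def Claim_equal_solution : Prop := ∀ (n : Int), Dom_solution n → Spec_solution n (solution n)

-- ===== LEMMAS AND PROOFS =====

theorem gcd_shift (q r : Int) : Int.gcd (6 * q + r) 6 = Int.gcd r 6 := by
  rw [← Int.gcd_emod (6 * q + r) 6, ← Int.gcd_emod r 6]
  congr 1
  omega

theorem solution_spec : Claim_equal_solution := by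
  intro n _
  unfold Spec_solution solution solution_alt solutionLoop
  obtain ⟨q, r, hr1, hr2, hn⟩ : ∃ q r : Int, 0 ≤ r ∧ r < 6 ∧ n = 6 * q + r :=
    ⟨n / 6, n % 6, by omega, by omega, by omega⟩
  subst hn
  rw [gcd_shift]
  have h6 : (0:Int) < 6 := by norm_num
  interval_cases r <;>
    simp only [solutionLoop, Int.gcd, PySem.Int.mod_eq_emod_of_pos h6,
      PySem.Int.floordiv_eq_ediv_of_pos h6] <;>
    norm_num <;> omega
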